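-- pv_equiv track=rewrite | github.com/bifold-pathomics/PathoROB | pathorob/apd/utils.py | get_patches_map_to_split
-- ===== SOURCE A (Python) =====
-- def get_patches_map_to_split(dataset, split, num_patches_per_slide):
--     """
--     Calculate number of training patches per category (med_center-bio_class-combination) for a given split.
--
--     Args:
--         dataset (str): The selected dataset; either `camelyon`, `tcga`, or `tolkach_esca`.
--         split (int: [0, ..., splits-1]): The split for which the numbers are calculated.
--         num_patches_per_slide (int): Number of patches per slide for downstream experiment.
--
--     Returns:
--         list of tuples (i, j, num_paches): List of numbers of training patches (num_patches) per category: med_center(i)-bio_class(j)-combination.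
--         int: Maximum number of training slides per category.
--     """
--     if dataset == "camelyon":
--         tss0_pairs = [(0, 0, (7 - split) * num_patches_per_slide), (0, 1, (7 + split) * num_patches_per_slide)]
--         tss1_pairs = [(1, 0, (7 + split) * num_patches_per_slide), (1, 1, (7 - split) * num_patches_per_slide)]
--         return sorted(tss0_pairs + tss1_pairs), 14
--
--     elif dataset == "tcga":
--         diag_pairs = [(i, j, (split + 2) * num_patches_per_slide) for i in range(4) for j in range(4) if i == j]
--         inv_diag_pairs = [(i, j, (1 if split % 2 == 1 else (2 if split < 3 else 0)) * num_patches_per_slide) for i in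
--                           range(4) for j in range(4) if i + j == 3]
--         rest_pairs = [(i, j, (2 if split < 2 else (1 if split < 5 else 0)) * num_patches_per_slide) for i in range(4)
--                       for j in range(4) if i != j and i + j != 3]
--         return sorted(diag_pairs + inv_diag_pairs + rest_pairs), 8
--
--     elif dataset == "tolkach_esca":
--         tss0_pairs = [(0, j, (3 - split) * num_patches_per_slide) for j in range(3)] + [
--             (0, j, (3 + split) * num_patches_per_slide) for j in range(3, 6)]
--         tss1_pairs = [(1, j, (3 + split) * num_patches_per_slide) for j in range(3)] + [
--             (1, j, (3 - split) * num_patches_per_slide) for j in range(3, 6)]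
--         return sorted(tss0_pairs + tss1_pairs), 6
--
--     else:
--         raise ValueError(f"Unknown dataset: {dataset}")
-- ===== SOURCE B (Python) =====
-- def get_patches_map_to_split(dataset, split, num_patches_per_slide):
--     """Build the per-category multiplier MATRIX first (imperative fills for tcga),
--     then flatten it once with enumerate; no sort, no filtered sublists."""
--     if dataset == "camelyon":
--         a, b = 7 - split, 7 + split
--         M = [[a, b], [b, a]]
--         max_slides = 14
--     elif dataset == "tcga":
--         d = split + 2
--         v = 1 if split % 2 == 1 else (2 if split < 3 else 0)
--         r = 2 if split < 2 else (1 if split < 5 else 0)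
--         M = [[r] * 4 for _ in range(4)]
--         for i in range(4):
--             M[i][i] = d
--             M[i][3 - i] = v
--         max_slides = 8
--     elif dataset == "tolkach_esca":
--         lo, hi = 3 - split, 3 + split
--         M = [[lo] * 3 + [hi] * 3, [hi] * 3 + [lo] * 3]
--         max_slides = 6
--     else:
--         raise ValueError(f"Unknown dataset: {dataset}")
--     return [(i, j, m * num_patches_per_slide)
--             for i, row in enumerate(M) for j, m in enumerate(row)], max_slides
-- ===== Notes on version B (the rewrite author's own statement) =====
-- stated objective: alternative
-- what changed: B first constructs the per-dataset multiplier matrix as an explicit 2D table (filled imperatively for tcga: rest-filled rows, then diagonal and anti-diagonal cells overwritten), and then flattens it once with enumerate; A builds filtered category sublists, concatenates and sorts.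
-- outside the precondition, e.g. on get_patches_map_to_split('foo', 0, 1): A raises ValueError, B raises ValueError
import Mathlib
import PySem

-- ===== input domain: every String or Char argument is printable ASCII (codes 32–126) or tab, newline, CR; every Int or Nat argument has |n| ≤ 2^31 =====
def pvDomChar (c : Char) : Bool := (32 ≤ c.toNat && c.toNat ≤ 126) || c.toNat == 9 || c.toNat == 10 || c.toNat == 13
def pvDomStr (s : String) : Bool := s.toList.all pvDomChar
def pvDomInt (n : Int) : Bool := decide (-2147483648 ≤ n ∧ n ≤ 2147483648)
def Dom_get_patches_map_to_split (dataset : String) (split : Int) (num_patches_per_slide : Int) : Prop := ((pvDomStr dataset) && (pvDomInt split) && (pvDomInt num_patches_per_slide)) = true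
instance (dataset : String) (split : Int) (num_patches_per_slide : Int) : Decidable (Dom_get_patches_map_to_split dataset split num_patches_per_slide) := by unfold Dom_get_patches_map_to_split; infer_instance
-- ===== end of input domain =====

-- B builds the per-dataset multiplier matrix as an explicit 2D table (imperative diagonal/anti-diagonal fills
-- for tcga) and flattens it once with enumerate; A builds filtered sublists, concatenates and sorts
-- (objective: alternative). Both Pythons raise ValueError on an unknown dataset name; Pre_ excludes exactly those.

-- ===== PORT A =====
-- sorted(triples): the (i, j) prefixes of the triples are pairwise distinct in every branch, so Python's
-- lexicographic tuple sort is exactly the stable two-key sort on (i, j); PySem.List.sorted2 is exact here.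
def get_patches_map_to_split (dataset : String) (split : Int) (num_patches_per_slide : Int) : (List (Int × Int × Int)) × Int :=
  if dataset == "camelyon" then
    let tss0_pairs : List (Int × Int × Int) := [(0, 0, (7 - split) * num_patches_per_slide), (0, 1, (7 + split) * num_patches_per_slide)]
    let tss1_pairs : List (Int × Int × Int) := [(1, 0, (7 + split) * num_patches_per_slide), (1, 1, (7 - split) * num_patches_per_slide)]
    (PySem.List.sorted2 (tss0_pairs ++ tss1_pairs) (fun t => t.1) (fun t => t.2.1), 14)
  else if dataset == "tcga" then
    let diag_pairs : List (Int × Int × Int) :=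
      (PySem.List.pyRange 0 4 1).flatMap (fun i => ((PySem.List.pyRange 0 4 1).filter (fun j => i == j)).map (fun j => (i, j, (split + 2) * num_patches_per_slide)))
    let inv_diag_pairs : List (Int × Int × Int) :=
      (PySem.List.pyRange 0 4 1).flatMap (fun i => ((PySem.List.pyRange 0 4 1).filter (fun j => i + j == 3)).map (fun j => (i, j, (if PySem.Int.mod split 2 == 1 then 1 else (if split < 3 then 2 else 0)) * num_patches_per_slide)))
    let rest_pairs : List (Int × Int × Int) :=
      (PySem.List.pyRange 0 4 1).flatMap (fun i => ((PySem.List.pyRange 0 4 1).filter (fun j => !(i == j) && !(i + j == 3))).map (fun j => (i, j, (if split < 2 then 2 else (if split < 5 then 1 else 0)) * num_patches_per_slide)))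
    (PySem.List.sorted2 (diag_pairs ++ inv_diag_pairs ++ rest_pairs) (fun t => t.1) (fun t => t.2.1), 8)
  else if dataset == "tolkach_esca" then
    let tss0_pairs : List (Int × Int × Int) :=
      (PySem.List.pyRange 0 3 1).map (fun j => ((0 : Int), j, (3 - split) * num_patches_per_slide)) ++
      (PySem.List.pyRange 3 6 1).map (fun j => ((0 : Int), j, (3 + split) * num_patches_per_slide))
    let tss1_pairs : List (Int × Int × Int) :=
      (PySem.List.pyRange 0 3 1).map (fun j => ((1 : Int), j, (3 + split) * num_patches_per_slide)) ++
      (PySem.List.pyRange 3 6 1).map (fun j => ((1 : Int), j, (3 - split) * num_patches_per_slide))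
    (PySem.List.sorted2 (tss0_pairs ++ tss1_pairs) (fun t => t.1) (fun t => t.2.1), 6)
  else
    ([], 0)  -- Python raises ValueError here; excluded by Pre_

-- ===== PORT B =====
-- M[i][i] = d / M[i][3-i] = v: the indices i and 3-i lie in [0, 4), so List.set at .toNat is exact.
def pvFlattenEnum (M : List (List Int)) (num_patches_per_slide : Int) : List (Int × Int × Int) :=
  (PySem.List.enumerate M).flatMap (fun p =>
    (PySem.List.enumerate p.2).map (fun q => (p.1, q.1, q.2 * num_patches_per_slide)))

def get_patches_map_to_split_alt (dataset : String) (split : Int) (num_patches_per_slide : Int) : (List (Int × Int × Int)) × Int :=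
  if dataset == "camelyon" then
    let a := 7 - split
    let b := 7 + split
    let M : List (List Int) := [[a, b], [b, a]]
    (pvFlattenEnum M num_patches_per_slide, 14)
  else if dataset == "tcga" then
    let d := split + 2
    let v := if PySem.Int.mod split 2 == 1 then 1 else (if split < 3 then 2 else 0)
    let r := if split < 2 then 2 else (if split < 5 then 1 else 0)
    let M0 : List (List Int) := (PySem.List.pyRange 0 4 1).map (fun _ => List.replicate 4 r)
    let M : List (List Int) := (PySem.List.pyRange 0 4 1).foldl (fun M i =>
      let row := (M.getD i.toNat []).set i.toNat d
      let row := row.set (3 - i).toNat v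
      M.set i.toNat row) M0
    (pvFlattenEnum M num_patches_per_slide, 8)
  else if dataset == "tolkach_esca" then
    let lo := 3 - split
    let hi := 3 + split
    let M : List (List Int) := [List.replicate 3 lo ++ List.replicate 3 hi, List.replicate 3 hi ++ List.replicate 3 lo]
    (pvFlattenEnum M num_patches_per_slide, 6)
  else
    ([], 0)  -- Python raises ValueError here; excluded by Pre_

-- ===== PRECONDITION & SPEC =====
-- Pre_ excludes exactly the unknown dataset names, on which A (and B) raise ValueError.
def Pre_get_patches_map_to_split (dataset : String) (split : Int) (num_patches_per_slide : Int) : Prop :=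
  dataset = "camelyon" ∨ dataset = "tcga" ∨ dataset = "tolkach_esca"
instance (dataset : String) (split : Int) (num_patches_per_slide : Int) : Decidable (Pre_get_patches_map_to_split dataset split num_patches_per_slide) := by unfold Pre_get_patches_map_to_split; infer_instance
def pvWitness_get_patches_map_to_split : String × Int × Int := ("tcga", 3, 5)

def Spec_get_patches_map_to_split (dataset : String) (split : Int) (num_patches_per_slide : Int) (out : (List (Int × Int × Int)) × Int) : Prop := out = get_patches_map_to_split_alt dataset split num_patches_per_slide
instance (dataset : String) (split : Int) (num_patches_per_slide : Int) (out : (List (Int × Int × Int)) × Int) : Decidable (Spec_get_patches_map_to_split dataset split num_patches_per_slide out) := by unfold Spec_get_patches_map_to_split; infer_instance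

-- ===== CLAIM =====
def Claim_equal_get_patches_map_to_split : Prop := ∀ (dataset : String) (split : Int) (num_patches_per_slide : Int), Dom_get_patches_map_to_split dataset split num_patches_per_slide → Pre_get_patches_map_to_split dataset split num_patches_per_slide → Spec_get_patches_map_to_split dataset split num_patches_per_slide (get_patches_map_to_split dataset split num_patches_per_slide)

-- ===== LEMMAS AND PROOFS =====

-- ===== VERDICT =====
theorem get_patches_map_to_split_spec : Claim_equal_get_patches_map_to_split := by
  intro dataset split n _ hpre
  unfold Spec_get_patches_map_to_split
  have r3 : PySem.List.pyRange 0 3 1 = [0, 1, 2] := by decide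
  have r36 : PySem.List.pyRange 3 6 1 = [3, 4, 5] := by decide
  have r4 : PySem.List.pyRange 0 4 1 = [0, 1, 2, 3] := by decide
  rcases hpre with h | h | h <;> subst h <;>
    simp only [get_patches_map_to_split, get_patches_map_to_split_alt, pvFlattenEnum, r3, r36, r4] <;>
    norm_num [PySem.List.sorted2, PySem.List.sorted, PySem.List.insertBy, PySem.List.enumerate,
      List.foldl, List.flatMap, List.replicate, List.set, List.getD, Int.toNat]
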